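-- pv_equiv track=rewrite | github.com/RimoAccelerator/KTTK | kttk_mixer.py | outputListInt
-- ===== SOURCE A (Python) =====
-- def outputListInt(list):
-- 	i = 0
-- 	output = ''
-- 	for num in list:
-- 		i += 1
-- 		if i == 7:
-- 			output += '\n'
-- 			i = 1
-- 		output += str(format(int(num), '12'))
-- 	return output
-- ===== SOURCE B (Python) =====
-- def outputListInt(list):
--     parts = [format(int(num), '12') for num in list]
--     return '\n'.join(''.join(parts[k:k + 6]) for k in range(0, len(parts), 6))
-- ===== Notes on version B (the rewrite author's own statement) =====
-- stated objective: simpler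
-- what changed: Replaces the single pass with a running counter and inline newline insertion by a three-step decomposition: format every element, slice the list into chunks of 6, and join chunks with newlines.
import Mathlib
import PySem

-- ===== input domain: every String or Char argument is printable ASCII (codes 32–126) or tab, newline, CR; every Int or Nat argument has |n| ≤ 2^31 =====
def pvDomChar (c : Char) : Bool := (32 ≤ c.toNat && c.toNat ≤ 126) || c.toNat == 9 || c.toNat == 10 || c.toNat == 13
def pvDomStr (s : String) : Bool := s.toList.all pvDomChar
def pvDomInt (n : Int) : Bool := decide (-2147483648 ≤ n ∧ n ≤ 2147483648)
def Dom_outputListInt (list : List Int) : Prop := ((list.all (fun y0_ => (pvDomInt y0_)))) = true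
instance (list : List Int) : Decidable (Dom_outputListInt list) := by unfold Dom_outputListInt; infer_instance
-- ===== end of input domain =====

-- B replaces A's single pass with a running counter and inline newlines by
-- format-all, chunk into slices of 6, and join — simpler decomposition, same output.

-- shared helper: format(int(num), '12') — str(num) right-aligned with spaces to width 12
def fmt12 (n : Int) : List Char :=
  let s := PySem.Int.toChars n
  List.replicate (12 - s.length) ' ' ++ s

-- ===== PORT A =====
-- loop body of A: i += 1; if i == 7: output += '\n'; i = 1; output += format(...)
def stepA (st : Int × List Char) (num : Int) : Int × List Char :=
  let i := st.1 + 1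
  if i = 7 then (1, (st.2 ++ ['\n']) ++ fmt12 num)
  else (i, st.2 ++ fmt12 num)

def outputListInt (list : List Int) : String :=
  String.mk (list.foldl stepA (0, [])).2

-- ===== PORT B =====
-- parts[k:k+6] chunks, each ''.join-ed (chunking by take/drop, exact for the slice parts[k:k+6])
def chunk6 (p : List (List Char)) : List (List Char) :=
  if h : p = [] then []
  else PySem.Chars.join [] (p.take 6) :: chunk6 (p.drop 6)
termination_by p.length
decreasing_by
  simp only [List.length_drop]
  have : p.length ≠ 0 := by simpa [List.length_eq_zero_iff] using h
  omega

def outputListInt_alt (list : List Int) : String :=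
  String.mk (PySem.Chars.join ['\n'] (chunk6 (list.map fmt12)))

-- ===== PRECONDITION & SPEC =====
def Spec_outputListInt (list : List Int) (out : String) : Prop := out = outputListInt_alt list
instance (list : List Int) (out : String) : Decidable (Spec_outputListInt list out) := by unfold Spec_outputListInt; infer_instance

-- ===== CLAIM (what is proved, stated in full; the proofs are below) =====
def Claim_equal_outputListInt : Prop := ∀ (list : List Int), Dom_outputListInt list → Spec_outputListInt list (outputListInt list)

-- ===== LEMMAS AND PROOFS =====

-- common recursive characterisation of the output: lines of 6 joined by '\n'
def render (l : List Int) : List Char :=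
  if h : l = [] then []
  else ((l.take 6).map fmt12).flatten ++
       (if l.drop 6 = [] then [] else '\n' :: render (l.drop 6))
termination_by l.length
decreasing_by
  simp only [List.length_drop]
  have : l.length ≠ 0 := by simpa [List.length_eq_zero_iff] using h
  omega

theorem render_eq (l : List Int) :
    render l = ((l.take 6).map fmt12).flatten ++
       (if l.drop 6 = [] then [] else '\n' :: render (l.drop 6)) := by
  rw [render]
  by_cases h : l = [] <;> simp [h]

theorem join_empty_eq_flatten (ps : List (List Char)) :
    PySem.Chars.join [] ps = ps.flatten := by
  induction ps with
  | nil => simp [PySem.Chars.join_nil]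
  | cons p rest ih =>
    cases rest with
    | nil => simp [PySem.Chars.join_singleton]
    | cons q r => simp [PySem.Chars.join_cons_cons, ih]

theorem join_cons_of_ne_nil (sep a : List Char) (rest : List (List Char)) (h : rest ≠ []) :
    PySem.Chars.join sep (a :: rest) = a ++ sep ++ PySem.Chars.join sep rest := by
  cases rest with
  | nil => exact absurd rfl h
  | cons q r => exact PySem.Chars.join_cons_cons sep a q r

theorem chunk6_nil : chunk6 [] = [] := by rw [chunk6]; simp

theorem chunk6_ne_nil (p : List (List Char)) (h : p ≠ []) : chunk6 p ≠ [] := by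
  rw [chunk6]; simp [h]

-- A's loop invariant: with counter 7 - k (1 ≤ k ≤ 7), the current line has k - 1 free slots
theorem A_gen (l : List Int) : ∀ (k : Nat) (out : List Char), 1 ≤ k → k ≤ 7 →
    (l.foldl stepA (7 - (k : Int), out)).2 =
      out ++ ((l.take (k - 1)).map fmt12).flatten ++
        (if l.drop (k - 1) = [] then [] else '\n' :: render (l.drop (k - 1))) := by
  induction l with
  | nil => intro k out _ _; simp
  | cons x xs ih =>
    intro k out hk1 hk7
    by_cases hk : k = 1
    · subst hk
      have hstep : stepA (7 - ((1 : Nat) : Int), out) x = (1, (out ++ ['\n']) ++ fmt12 x) := by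
        simp [stepA]
      have h6 : (1 : Int) = 7 - ((6 : Nat) : Int) := by norm_num
      simp only [List.foldl_cons, hstep, h6]
      rw [ih 6 ((out ++ ['\n']) ++ fmt12 x) (by omega) (by omega)]
      rw [show (1 : Nat) - 1 = 0 from rfl, List.take_zero, List.drop_zero,
          if_neg (by simp : ¬(x :: xs = [])), render_eq (x :: xs),
          show (6 : Nat) - 1 = 5 from rfl,
          show (x :: xs).take 6 = x :: xs.take 5 from rfl,
          show (x :: xs).drop 6 = xs.drop 5 from rfl]
      simp [List.append_assoc]
    · have hk2 : 2 ≤ k := by omega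
      have hne : (7 - (k : Int)) + 1 ≠ 7 := by
        intro h
        have : (k : Int) = 1 := by omega
        exact hk (by exact_mod_cast this)
      have hstep : stepA (7 - ((k : Nat) : Int), out) x = (7 - ((k - 1 : Nat) : Int), out ++ fmt12 x) := by
        simp only [stepA, if_neg hne]
        congr 1
        push_cast [Nat.cast_sub (by omega : 1 ≤ k)]
        ring
      simp only [List.foldl_cons, hstep]
      rw [ih (k - 1) (out ++ fmt12 x) (by omega) (by omega)]
      obtain ⟨m, hm⟩ : ∃ m, k - 1 = m + 1 := ⟨k - 2, by omega⟩
      have hm2 : k - 1 - 1 = m := by omega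
      rw [hm2, hm, List.take_succ_cons, List.drop_succ_cons]
      simp [List.append_assoc]

theorem A_eq_render (l : List Int) : outputListInt l = String.mk (render l) := by
  unfold outputListInt
  have h0 : (0 : Int) = 7 - ((7 : Nat) : Int) := by norm_num
  rw [h0, A_gen l 7 [] (by omega) (by omega), render_eq l]
  simp

theorem B_gen : ∀ (n : Nat) (l : List Int), l.length ≤ n →
    PySem.Chars.join ['\n'] (chunk6 (l.map fmt12)) = render l := by
  intro n
  induction n with
  | zero =>
    intro l hl
    have : l = [] := by simpa [List.length_eq_zero_iff] using Nat.le_zero.mp hl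
    subst this
    simp [chunk6, PySem.Chars.join_nil, render]
  | succ n ih =>
    intro l hl
    by_cases h : l = []
    · subst h; simp [chunk6, PySem.Chars.join_nil, render]
    · have hmap : l.map fmt12 ≠ [] := by simp [h]
      rw [chunk6]
      simp only [hmap, dif_neg, not_false_iff]
      rw [← List.map_take, ← List.map_drop, join_empty_eq_flatten]
      by_cases hd : l.drop 6 = []
      · simp only [hd, List.map_nil, chunk6_nil]
        rw [PySem.Chars.join_singleton, render_eq l, hd]
        simp
      · have hmd : (l.drop 6).map fmt12 ≠ [] := by simpa using hd
        rw [join_cons_of_ne_nil _ _ _ (chunk6_ne_nil _ hmd)]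
        have hlen : (l.drop 6).length ≤ n := by
          have h6 : ¬ l.length ≤ 6 := by rw [← List.drop_eq_nil_iff]; exact hd
          simp only [List.length_drop]; omega
        rw [ih (l.drop 6) hlen, render_eq l]
        simp [hd, List.append_assoc]

-- ===== VERDICT (by name: the statement is the Claim_ definition above) =====
theorem outputListInt_spec : Claim_equal_outputListInt := by
  intro l _
  show outputListInt l = outputListInt_alt l
  rw [A_eq_render, outputListInt_alt, B_gen l.length l le_rfl]
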